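-- pv_equiv track=rewrite | github.com/jsonchin/BIDS | flaskr/flaskr/matching_tfidf.py | split_first_last_name
-- ===== SOURCE A (Python) =====
-- def split_first_last_name(s):
--     """
--     Find highest two 'words', those are the first and last name by order
--     """
--     l = s.lower().split(' ')
--     lengths = [len(w) for w in l]
--     max_index = max(range(len(l)), key=lambda i: lengths[i])
--     max_word = l[max_index]
--     lengths[max_index] = -1
--
--     max_index2 = max(range(len(l)), key=lambda i: lengths[i])
--     max_word2 = l[max_index2]
--
--     if max_index < max_index2:
--         return max_word, max_word2
--     else:
--         return max_word2, max_word
-- ===== SOURCE B (Python) =====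
-- def split_first_last_name(s):
--     # single pass keeping the two best (index, length) slots; strict '>' keeps earliest on ties
--     words = s.lower().split(' ')
--     i1, m1 = 0, len(words[0])
--     i2, m2 = 0, -1
--     for i, w in enumerate(words[1:], 1):
--         n = len(w)
--         if n > m1:
--             i1, m1, i2, m2 = i, n, i1, m1
--         elif n > m2:
--             i2, m2 = i, n
--     if i1 < i2:
--         return words[i1], words[i2]
--     return words[i2], words[i1]
-- ===== Notes on version B (the rewrite author's own statement) =====
-- stated objective: alternative
-- what changed: B replaces A's two full argmax passes over an auxiliary lengths list (with a sentinel overwrite between them) by one pass over the words maintaining the two best (index, length) slots; it trades the extra passes for a per-element branch, which CPython does not reward.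
import Mathlib
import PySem

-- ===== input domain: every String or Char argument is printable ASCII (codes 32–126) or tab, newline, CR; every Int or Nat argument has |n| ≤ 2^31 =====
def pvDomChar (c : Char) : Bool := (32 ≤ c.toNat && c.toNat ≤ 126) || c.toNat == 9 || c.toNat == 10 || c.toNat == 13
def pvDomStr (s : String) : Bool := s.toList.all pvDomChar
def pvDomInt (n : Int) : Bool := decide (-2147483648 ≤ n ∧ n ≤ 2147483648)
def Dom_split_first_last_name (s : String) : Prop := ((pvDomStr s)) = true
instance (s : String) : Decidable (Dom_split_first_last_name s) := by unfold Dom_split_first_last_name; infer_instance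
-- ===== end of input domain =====

-- B replaces A's two full argmax passes over an auxiliary lengths list by one pass keeping the two best (index, length) slots; return value only, no side effects.

-- ===== PORT A =====
-- s.split(' ') is always a nonempty list, so range(len(l)) is nonempty and both max() calls succeed,
-- and both lambda arguments i are in range: the 'none' branches and pyGetD defaults below are unreachable totality guards.
def split_first_last_name (s : String) : String × String :=
  match PySem.Str.split? (PySem.Str.lower s) " " with
  | none => ("", "")
  | some l =>
    let lengths := l.map (fun w => PySem.Str.len w)
    match PySem.List.max? (PySem.List.pyRange 0 (l.length : Int) 1) (fun i => PySem.List.pyGetD lengths i 0) with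
    | none => ("", "")
    | some maxIndex =>
      let maxWord := PySem.List.pyGetD l maxIndex ""
      let lengths2 := lengths.set maxIndex.toNat (-1)
      match PySem.List.max? (PySem.List.pyRange 0 (l.length : Int) 1) (fun i => PySem.List.pyGetD lengths2 i 0) with
      | none => ("", "")
      | some maxIndex2 =>
        let maxWord2 := PySem.List.pyGetD l maxIndex2 ""
        if maxIndex < maxIndex2 then (maxWord, maxWord2) else (maxWord2, maxWord)

-- ===== PORT B =====
-- loop body of B: state (i1, m1, i2, m2), strict '>' keeps the earliest word on ties
def pvBStep (st : Int × Int × Int × Int) (iw : Int × String) : Int × Int × Int × Int :=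
  match st, iw with
  | (i1, m1, i2, m2), (i, w) =>
    let n := PySem.Str.len w
    if m1 < n then (i, n, i1, m1)
    else if m2 < n then (i1, m1, i, n)
    else (i1, m1, i2, m2)

def split_first_last_name_alt (s : String) : String × String :=
  match PySem.Str.split? (PySem.Str.lower s) " " with
  | none => ("", "")   -- unreachable totality guard: split(' ') never raises
  | some words =>
    match (PySem.List.enumerate (PySem.List.slice words (some 1) none) 1).foldl pvBStep
        (0, PySem.Str.len (PySem.List.pyGetD words 0 ""), 0, -1) with
    | (i1, _, i2, _) =>
      if i1 < i2 then (PySem.List.pyGetD words i1 "", PySem.List.pyGetD words i2 "")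
      else (PySem.List.pyGetD words i2 "", PySem.List.pyGetD words i1 "")

-- ===== PRECONDITION & SPEC =====
def Spec_split_first_last_name (s : String) (out : String × String) : Prop := out = split_first_last_name_alt s
instance (s : String) (out : String × String) : Decidable (Spec_split_first_last_name s out) := by unfold Spec_split_first_last_name; infer_instance

-- ===== CLAIM (what is proved, stated in full; the proofs are below) =====
def Claim_equal_split_first_last_name : Prop := ∀ (s : String), Dom_split_first_last_name s → Spec_split_first_last_name s (split_first_last_name s)

-- ===== LEMMAS AND PROOFS =====

-- 'i m is the first maximum of xs': m = xs[i], every entry is ≤ m, every earlier entry is < m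
def pvFirstMax (xs : List Int) (i m : Int) : Prop :=
  0 ≤ i ∧ i < xs.length ∧ m = PySem.List.pyGetD xs i 0 ∧
  (∀ j : Int, 0 ≤ j → j < xs.length → PySem.List.pyGetD xs j 0 ≤ m) ∧
  (∀ j : Int, 0 ≤ j → j < i → PySem.List.pyGetD xs j 0 < m)

-- invariant of B's fold state over the lengths list xs
def pvInv (xs : List Int) (st : Int × Int × Int × Int) : Prop :=
  pvFirstMax xs st.1 st.2.1 ∧ pvFirstMax (xs.set st.1.toNat (-1)) st.2.2.1 st.2.2.2

theorem pvFoldl_stay {α κ : Type} [LinearOrder κ] (key : α → κ) (i : α) (r : List α)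
    (h : ∀ y ∈ r, key y ≤ key i) :
    r.foldl (fun acc x => match acc with
      | none => some x
      | some m => if key m < key x then some x else some m) (some i) = some i := by
  induction r with
  | nil => rfl
  | cons y t ih =>
    simp only [List.foldl_cons]
    rw [if_neg (by exact not_lt.mpr (h y (by simp)))]
    exact ih (fun z hz => h z (by simp [hz]))

theorem pvMax?_split {α κ : Type} [LinearOrder κ] (r1 r2 : List α) (key : α → κ) (i : α)
    (h1 : ∀ y ∈ r1, key y < key i) (h2 : ∀ y ∈ r2, key y ≤ key i) :
    PySem.List.max? (r1 ++ i :: r2) key = some i := by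
  unfold PySem.List.max?
  rw [List.foldl_append, List.foldl_cons]
  show List.foldl (fun acc x => match acc with
      | none => some x
      | some m => if key m < key x then some x else some m)
    (match PySem.List.max? r1 key with
      | none => some i
      | some m => if key m < key i then some i else some m) r2 = some i
  cases hm : PySem.List.max? r1 key with
  | none => exact pvFoldl_stay key i r2 h2
  | some m =>
    have hmem := PySem.List.max?_mem hm
    show List.foldl _ (if key m < key i then some i else some m) r2 = some i
    rw [if_pos (h1 m hmem)]
    exact pvFoldl_stay key i r2 h2

-- a pvFirstMax witness is what PySem.List.max? over range(len(xs)) returns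
theorem pvArgmax_eq (xs : List Int) (i m : Int) (h : pvFirstMax xs i m) :
    PySem.List.max? (PySem.List.pyRange 0 (xs.length : Int) 1) (fun j => PySem.List.pyGetD xs j 0) = some i := by
  obtain ⟨h0, h1, hv, hdom, hfirst⟩ := h
  have hsplit : PySem.List.pyRange 0 (xs.length : Int) 1 =
      PySem.List.pyRange 0 i 1 ++ i :: PySem.List.pyRange (i+1) (xs.length : Int) 1 := by
    rw [PySem.List.pyRange_one_append 0 i (xs.length : Int) h0 (le_of_lt h1),
        PySem.List.pyRange_one_cons h1]
  rw [hsplit]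
  apply pvMax?_split
  · intro y hy
    rw [PySem.List.mem_pyRange_one] at hy
    calc PySem.List.pyGetD xs y 0 < m := hfirst y hy.1 hy.2
      _ = PySem.List.pyGetD xs i 0 := hv
  · intro y hy
    rw [PySem.List.mem_pyRange_one] at hy
    calc PySem.List.pyGetD xs y 0 ≤ m := hdom y (by omega) (by omega)
      _ = PySem.List.pyGetD xs i 0 := hv

theorem pvGetD_append_left (xs : List Int) (x d : Int) {j : Int} (h0 : 0 ≤ j) (h1 : j < xs.length) :
    PySem.List.pyGetD (xs ++ [x]) j d = PySem.List.pyGetD xs j d := by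
  rw [PySem.List.pyGetD_eq_getElem _ _ h0 (by simp; omega),
      PySem.List.pyGetD_eq_getElem _ _ h0 h1]
  exact List.getElem_append_left (by omega)

theorem pvGetD_append_last (xs : List Int) (x d : Int) :
    PySem.List.pyGetD (xs ++ [x]) (xs.length : Int) d = x := by
  rw [PySem.List.pyGetD_eq_getElem _ _ (by positivity) (by simp)]
  simp

theorem pvInv_step (xs : List Int) (i1 m1 i2 m2 : Int) (w : String)
    (h : pvInv xs (i1, m1, i2, m2)) (hpos : 0 ≤ m1) :
    pvInv (xs ++ [PySem.Str.len w]) (pvBStep (i1, m1, i2, m2) ((xs.length : Int), w)) := by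
  dsimp only [pvInv, pvFirstMax] at h
  obtain ⟨⟨h10, h11, h1v, h1d, h1f⟩, ⟨h20, h21, h2v, h2d, h2f⟩⟩ := h
  set n := PySem.Str.len w with hn
  have hn0 : 0 ≤ n := by rw [hn, PySem.Str.len_eq]; positivity
  have hyslen : (xs.set i1.toNat (-1)).length = xs.length := List.length_set
  rw [hyslen] at h21 h2d
  have hi1n : i1.toNat < xs.length := by omega
  have hi2n : i2.toNat < xs.length := by omega
  unfold pvBStep
  simp only [← hn]
  split_ifs with hA hB
  · -- n > m1 : new best is the appended word, old best shifts to second place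
    dsimp only [pvInv, pvFirstMax]
    refine ⟨⟨by positivity, by simp, (pvGetD_append_last xs n 0).symm, ?_, ?_⟩, ?_⟩
    · intro j hj0 hjlt
      rcases (by simp at hjlt; omega : j < (xs.length : Int) ∨ j = (xs.length : Int)) with hj | hj
      · rw [pvGetD_append_left xs n 0 hj0 hj]; have := h1d j hj0 hj; omega
      · rw [hj, pvGetD_append_last]
    · intro j hj0 hjlt
      rw [pvGetD_append_left xs n 0 hj0 hjlt]; have := h1d j hj0 hjlt; omega
    · -- second slot: the old first maximum, in xs ++ [-1]
      have hset : (xs ++ [n]).set (xs.length : Int).toNat (-1) = xs ++ [-1] := by simp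
      rw [hset]
      refine ⟨h10, by simp; omega, ?_, ?_, ?_⟩
      · rw [pvGetD_append_left xs (-1) 0 h10 h11]; exact h1v
      · intro j hj0 hjlt
        rcases (by simp at hjlt; omega : j < (xs.length : Int) ∨ j = (xs.length : Int)) with hj | hj
        · rw [pvGetD_append_left xs (-1) 0 hj0 hj]; exact h1d j hj0 hj
        · rw [hj, pvGetD_append_last]; omega
      · intro j hj0 hjlt
        rw [pvGetD_append_left xs (-1) 0 hj0 (by omega)]; exact h1f j hj0 hjlt
  · -- m2 < n ≤ m1 : first slot unchanged, appended word becomes second best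
    dsimp only [pvInv, pvFirstMax]
    have hset : (xs ++ [n]).set i1.toNat (-1) = xs.set i1.toNat (-1) ++ [n] :=
      List.set_append_left _ _ hi1n
    refine ⟨⟨h10, by simp; omega, ?_, ?_, ?_⟩, ?_⟩
    · rw [pvGetD_append_left xs n 0 h10 h11]; exact h1v
    · intro j hj0 hjlt
      rcases (by simp at hjlt; omega : j < (xs.length : Int) ∨ j = (xs.length : Int)) with hj | hj
      · rw [pvGetD_append_left xs n 0 hj0 hj]; exact h1d j hj0 hj
      · rw [hj, pvGetD_append_last]; omega
    · intro j hj0 hjlt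
      rw [pvGetD_append_left xs n 0 hj0 (by omega)]; exact h1f j hj0 hjlt
    · rw [hset]
      refine ⟨by positivity, by simp [hyslen], ?_, ?_, ?_⟩
      · have := pvGetD_append_last (xs.set i1.toNat (-1)) n 0
        rw [hyslen] at this; exact this.symm
      · intro j hj0 hjlt
        rcases (by simp [hyslen] at hjlt; omega : j < (xs.length : Int) ∨ j = (xs.length : Int)) with hj | hj
        · rw [pvGetD_append_left _ n 0 hj0 (by rw [hyslen]; exact hj)]
          have := h2d j hj0 hj; omega
        · have := pvGetD_append_last (xs.set i1.toNat (-1)) n 0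
          rw [hyslen] at this; rw [hj, this]
      · intro j hj0 hjlt
        rw [pvGetD_append_left _ n 0 hj0 (by rw [hyslen]; omega)]
        have := h2d j hj0 hjlt; omega
  · -- n ≤ m2 ≤ m1 : state unchanged
    dsimp only [pvInv, pvFirstMax]
    have hset : (xs ++ [n]).set i1.toNat (-1) = xs.set i1.toNat (-1) ++ [n] :=
      List.set_append_left _ _ hi1n
    refine ⟨⟨h10, by simp; omega, ?_, ?_, ?_⟩, ?_⟩
    · rw [pvGetD_append_left xs n 0 h10 h11]; exact h1v
    · intro j hj0 hjlt
      rcases (by simp at hjlt; omega : j < (xs.length : Int) ∨ j = (xs.length : Int)) with hj | hj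
      · rw [pvGetD_append_left xs n 0 hj0 hj]; exact h1d j hj0 hj
      · rw [hj, pvGetD_append_last]; omega
    · intro j hj0 hjlt
      rw [pvGetD_append_left xs n 0 hj0 (by omega)]; exact h1f j hj0 hjlt
    · rw [hset]
      refine ⟨h20, by simp [hyslen]; omega, ?_, ?_, ?_⟩
      · rw [pvGetD_append_left _ n 0 h20 (by rw [hyslen]; exact h21)]; exact h2v
      · intro j hj0 hjlt
        rcases (by simp [hyslen] at hjlt; omega : j < (xs.length : Int) ∨ j = (xs.length : Int)) with hj | hj
        · rw [pvGetD_append_left _ n 0 hj0 (by rw [hyslen]; exact hj)]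
          exact h2d j hj0 hj
        · have := pvGetD_append_last (xs.set i1.toNat (-1)) n 0
          rw [hyslen] at this; rw [hj, this]; omega
      · intro j hj0 hjlt
        rw [pvGetD_append_left _ n 0 hj0 (by rw [hyslen]; omega)]
        exact h2f j hj0 hjlt

theorem pv_m1_nonneg (l : List String) (i m : Int)
    (h : pvFirstMax (l.map PySem.Str.len) i m) : 0 ≤ m := by
  obtain ⟨h0, h1, hv, -, -⟩ := h
  rw [List.length_map] at h1
  rw [hv, PySem.List.pyGetD_eq_getElem _ _ h0 (by simp; omega)]
  simp [PySem.Str.len_eq]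

theorem pvInv_fold (w : String) (t : List String) :
    pvInv ((w :: t).map PySem.Str.len)
      ((PySem.List.enumerate t 1).foldl pvBStep (0, PySem.Str.len w, 0, -1)) := by
  induction t using List.reverseRecOn with
  | nil =>
    dsimp only [PySem.List.enumerate, pvInv, pvFirstMax, List.map, List.foldl]
    refine ⟨⟨le_refl 0, by simp, ?_, ?_, ?_⟩, ?_⟩
    · rw [PySem.List.pyGetD_eq_getElem _ _ (le_refl 0) (by simp)]; simp
    · intro j hj0 hjlt
      have : j = 0 := by simp at hjlt; omega
      subst this
      rw [PySem.List.pyGetD_eq_getElem _ _ (le_refl 0) (by simp)]; simp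
    · intro j hj0 hjlt; omega
    · refine ⟨le_refl 0, by simp, ?_, ?_, ?_⟩
      · rw [PySem.List.pyGetD_eq_getElem _ _ (le_refl 0) (by simp)]; simp
      · intro j hj0 hjlt
        have : j = 0 := by simp at hjlt; omega
        subst this
        rw [PySem.List.pyGetD_eq_getElem _ _ (le_refl 0) (by simp)]; simp
      · intro j hj0 hjlt; omega
  | append_singleton t x ih =>
    rw [PySem.List.enumerate_append, List.foldl_append]
    rcases hE : (PySem.List.enumerate t 1).foldl pvBStep (0, PySem.Str.len w, 0, -1) with
      ⟨i1, m1, i2, m2⟩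
    rw [hE] at ih
    have hone : PySem.List.enumerate [x] (1 + (t.length : Int)) = [((1 + (t.length : Int)), x)] := by
      simp [PySem.List.enumerate]
    rw [hone, List.foldl_cons, List.foldl_nil]
    have hmap : (w :: (t ++ [x])).map PySem.Str.len
        = (w :: t).map PySem.Str.len ++ [PySem.Str.len x] := by simp
    have hidx : (1 + (t.length : Int)) = (((w :: t).map PySem.Str.len).length : Int) := by
      simp; omega
    rw [hmap, hidx]
    exact pvInv_step _ i1 m1 i2 m2 x ih (pv_m1_nonneg _ _ _ ih.1)

theorem pvGo_ne_nil (sep : List Char) (fuel : Nat) (l cur : List Char) (acc : List (List Char)) :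
    PySem.Chars.splitOn.go sep fuel l cur acc ≠ [] := by
  induction fuel generalizing l cur acc with
  | zero => simp [PySem.Chars.splitOn.go]
  | succ n ih =>
    cases l with
    | nil => simp [PySem.Chars.splitOn.go]
    | cons c rest =>
      rw [PySem.Chars.splitOn.go]
      split
      · exact ih _ _ _
      · exact ih _ _ _

-- ===== VERDICT (by name: the statement is the Claim_ definition above) =====
theorem split_first_last_name_spec : Claim_equal_split_first_last_name := by
  intro s _
  unfold Spec_split_first_last_name split_first_last_name split_first_last_name_alt
  cases hsp : PySem.Str.split? (PySem.Str.lower s) " " with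
  | none =>
    exact absurd hsp (by simp [PySem.Str.split?, PySem.Chars.split?])
  | some l =>
    have hl : l ≠ [] := by
      simp only [PySem.Str.split?, PySem.Chars.split?] at hsp
      rw [if_neg (by decide)] at hsp
      simp only [Option.map_some, Option.some.injEq] at hsp
      intro hnil; rw [hnil] at hsp
      simp only [List.map_eq_nil_iff] at hsp
      exact pvGo_ne_nil _ _ _ _ _ hsp
    obtain ⟨w, t, rfl⟩ := List.exists_cons_of_ne_nil hl
    have hslice : PySem.List.slice (w :: t) (some 1) none = t := by
      rw [PySem.List.slice_from _ (by norm_num)]; simp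
    have hget0 : PySem.List.pyGetD (w :: t) 0 "" = w := by
      rw [PySem.List.pyGetD_eq_getElem _ _ (le_refl 0) (by simp)]; simp
    dsimp only
    rw [hslice, hget0]
    rcases hE : (PySem.List.enumerate t 1).foldl pvBStep (0, PySem.Str.len w, 0, -1) with
      ⟨i1, m1, i2, m2⟩
    have hInv := pvInv_fold w t
    rw [hE] at hInv
    dsimp only [pvInv] at hInv
    have hmax1 := pvArgmax_eq _ _ _ hInv.1
    have hmax2 := pvArgmax_eq _ _ _ hInv.2
    rw [List.length_map] at hmax1
    rw [List.length_set, List.length_map] at hmax2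
    rw [hmax1]
    dsimp only
    rw [hmax2]
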